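-- pv_equiv track=rewrite | github.com/Angela-OH/Algorithm | 백준/2468.py | dfs
-- ===== SOURCE A (Python) =====
-- def choose(n, maps, visited, height):
--     index = ()
--     for i in range(n):
--         for j in range(n):
--             if maps[i][j] > height and visited[i][j] == 0:
--                 return (i, j)
--     return index
--
-- def dfs(n, maps, min_max):
--     stack = []
--     move = [
--         (-1, 0),
--         (1, 0),
--         (0, 1),
--         (0, -1)
--     ]
--     min = min_max[0] - 1
--     max = min_max[1]
--     space_max = 0
--
--     for height in range(min, max):
--         cnt = 0
--         visited = [[0 for i in range(n)] for j in range(n)]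
--         while True:
--             index = choose(n, maps, visited, height)
--             if not index:
--                 break
--             stack.append(index)
--             visited[index[0]][index[1]] = 1
--             cnt += 1
--
--             while stack:
--                 node = stack.pop()
--                 x, y = node[0], node[1]
--                 for i in range(len(move)):
--                     a = x + move[i][0]
--                     b = y + move[i][1]
--                     if (0 <= a < n) and (0 <= b < n):
--                         if (maps[a][b] > height) and (visited[a][b] == 0):
--                             stack.append((a, b))
--                             visited[a][b] = 1
--         if cnt > space_max:
--             space_max = cnt
--
--     return space_max
-- ===== SOURCE B (Python) =====
-- def dfs(n, maps, min_max):
--     best = 0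
--     for height in range(min_max[0] - 1, min_max[1]):
--         visited = [[0] * n for _ in range(n)]
--         comps = 0
--         for i in range(n):
--             for j in range(n):
--                 if maps[i][j] > height and visited[i][j] == 0:
--                     comps += 1
--                     visited[i][j] = 1
--                     stack = [(i, j)]
--                     while stack:
--                         x, y = stack.pop()
--                         for a, b in ((x - 1, y), (x + 1, y), (x, y + 1), (x, y - 1)):
--                             if 0 <= a < n and 0 <= b < n and maps[a][b] > height and visited[a][b] == 0:
--                                 visited[a][b] = 1
--                                 stack.append((a, b))
--         best = max(best, comps)
--     return best
-- ===== Notes on version B (the rewrite author's own statement) =====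
-- stated objective: alternative
-- what changed: B iterates the grid cells once per height as flood-fill seeds (and takes max() of the per-height component counts) instead of A's restarting a full-grid `choose` scan after every flooded component.
import Mathlib
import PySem

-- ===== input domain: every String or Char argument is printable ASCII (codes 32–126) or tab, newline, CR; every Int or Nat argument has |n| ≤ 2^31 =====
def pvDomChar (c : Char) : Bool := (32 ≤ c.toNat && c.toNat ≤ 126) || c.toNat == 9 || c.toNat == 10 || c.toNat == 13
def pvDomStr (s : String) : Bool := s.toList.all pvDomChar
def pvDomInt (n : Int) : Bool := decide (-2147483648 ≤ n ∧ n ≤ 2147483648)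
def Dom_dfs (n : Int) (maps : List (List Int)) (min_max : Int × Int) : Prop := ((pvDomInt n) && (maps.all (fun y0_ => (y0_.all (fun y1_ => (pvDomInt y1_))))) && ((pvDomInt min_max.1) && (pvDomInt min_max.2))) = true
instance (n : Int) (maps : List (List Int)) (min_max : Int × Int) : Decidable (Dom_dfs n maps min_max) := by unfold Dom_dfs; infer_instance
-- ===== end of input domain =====

-- B seeds the flood fill by iterating the grid cells directly instead of restarting a full-grid `choose`
-- scan after each flooded component (objective: alternative).

-- shared cell/grid helpers (Python `g[i][j]` reads and `g[i][j] = 1`; defaults are never hit on the stated Pre_)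
def mapCell (g : List (List Int)) (i j : Int) : Int :=
  (PySem.List.pyGet? ((PySem.List.pyGet? g i).getD []) j).getD 0
def visCell (g : List (List Int)) (i j : Int) : Int :=
  (PySem.List.pyGet? ((PySem.List.pyGet? g i).getD []) j).getD 1
def setVis (g : List (List Int)) (i j : Int) : List (List Int) :=
  g.modify i.toNat (fun r => r.set j.toNat 1)
-- `if ok(a,b): mark and push` — the guarded neighbour push both floods perform
def pushStep (n : Int) (maps : List (List Int)) (height : Int)
    (s : List (Int × Int) × List (List Int)) (c : Int × Int) : List (Int × Int) × List (List Int) :=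
  if 0 ≤ c.1 ∧ c.1 < n ∧ 0 ≤ c.2 ∧ c.2 < n ∧ mapCell maps c.1 c.2 > height ∧ visCell s.2 c.1 c.2 = 0
  then ((c.1, c.2) :: s.1, setVis s.2 c.1 c.2) else s

-- totality-guard fuel: number of 0-entries of visited (each loop iteration marks at least one,
-- so a fuel of 5*zeros+|stack| / zeros+1 chosen at the call sites is never exhausted)
def zeros (g : List (List Int)) : Nat := (g.map (fun r => r.countP (fun v => v == 0))).sum

-- ===== PORT A =====
def chooseCols (maps vis : List (List Int)) (height i : Int) : List Int → Option (Int × Int)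
  | [] => none
  | j :: js =>
      if mapCell maps i j > height ∧ visCell vis i j = 0 then some (i, j)
      else chooseCols maps vis height i js

def chooseRows (n : Int) (maps vis : List (List Int)) (height : Int) : List Int → Option (Int × Int)
  | [] => none
  | i :: is =>
      match chooseCols maps vis height i (PySem.List.pyRange 0 n 1) with
      | some c => some c
      | none => chooseRows n maps vis height is

def chooseA (n : Int) (maps vis : List (List Int)) (height : Int) : Option (Int × Int) :=
  chooseRows n maps vis height (PySem.List.pyRange 0 n 1)

-- the inner `while stack:` loop of A (moves applied in A's order; fuel is only a totality guard)
def fillA (n : Int) (maps : List (List Int)) (height : Int) :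
    Nat → List (Int × Int) → List (List Int) → List (List Int)
  | _, [], vis => vis
  | 0, _ :: _, vis => vis
  | fuel + 1, (x, y) :: st, vis =>
      let s := ([(-1, 0), (1, 0), (0, 1), (0, -1)] : List (Int × Int)).foldl
        (fun s m => pushStep n maps height s (x + m.1, y + m.2)) (st, vis)
      fillA n maps height fuel s.1 s.2

-- the `while True: choose / flood` loop of A (fuel is only a totality guard)
def outerA (n : Int) (maps : List (List Int)) (height : Int) :
    Nat → List (List Int) → Int → Int
  | 0, _, cnt => cnt
  | fuel + 1, vis, cnt =>
      match chooseA n maps vis height with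
      | none => cnt
      | some c =>
          outerA n maps height fuel
            (fillA n maps height (5 * zeros (setVis vis c.1 c.2) + 1) [c] (setVis vis c.1 c.2))
            (cnt + 1)

def mkVisA (n : Int) : List (List Int) :=
  (PySem.List.pyRange 0 n 1).map (fun _ => (PySem.List.pyRange 0 n 1).map (fun _ => (0 : Int)))

def dfs (n : Int) (maps : List (List Int)) (min_max : Int × Int) : Int :=
  (PySem.List.pyRange (min_max.1 - 1) min_max.2 1).foldl
    (fun space_max height =>
      let cnt := outerA n maps height (zeros (mkVisA n) + 1) (mkVisA n) 0
      if cnt > space_max then cnt else space_max) 0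

-- ===== PORT B =====
-- the inner `while stack:` loop of B (the four neighbours written out, B's order = A's order)
def fillB (n : Int) (maps : List (List Int)) (height : Int) :
    Nat → List (Int × Int) → List (List Int) → List (List Int)
  | _, [], vis => vis
  | 0, _ :: _, vis => vis
  | fuel + 1, (x, y) :: st, vis =>
      let s := ([(x - 1, y), (x + 1, y), (x, y + 1), (x, y - 1)] : List (Int × Int)).foldl
        (pushStep n maps height) (st, vis)
      fillB n maps height fuel s.1 s.2

def mkVisB (n : Int) : List (List Int) :=
  (PySem.List.pyRange 0 n 1).map (fun _ => PySem.List.pyRepeat [(0 : Int)] n)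

def dfs_alt (n : Int) (maps : List (List Int)) (min_max : Int × Int) : Int :=
  (PySem.List.pyRange (min_max.1 - 1) min_max.2 1).foldl
    (fun best height =>
      let comps := ((PySem.List.pyRange 0 n 1).foldl
        (fun (s : List (List Int) × Int) i =>
          (PySem.List.pyRange 0 n 1).foldl
            (fun s j =>
              if mapCell maps i j > height ∧ visCell s.1 i j = 0 then
                (fillB n maps height (5 * zeros (setVis s.1 i j) + 1) [(i, j)] (setVis s.1 i j),
                  s.2 + 1)
              else s) s)
        (mkVisB n, 0)).2
      max best comps) 0

-- ===== PRECONDITION & SPEC =====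
-- Pre_ excludes exactly the inputs where the Python A raises IndexError: a nonempty height range with 0 < n
-- but fewer than n rows, or one of the first n rows shorter than n (B raises there as well).
def Pre_dfs (n : Int) (maps : List (List Int)) (min_max : Int × Int) : Prop :=
  (min_max.1 - 1 < min_max.2 ∧ 0 < n) →
    (n ≤ (maps.length : Int) ∧ ∀ r ∈ maps.take n.toNat, n ≤ (r.length : Int))
instance (n : Int) (maps : List (List Int)) (min_max : Int × Int) : Decidable (Pre_dfs n maps min_max) := by
  unfold Pre_dfs; infer_instance
def pvWitness_dfs : Int × List (List Int) × (Int × Int) := (2, [[2, 1], [1, 2]], (1, 2))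

def Spec_dfs (n : Int) (maps : List (List Int)) (min_max : Int × Int) (out : Int) : Prop :=
  out = dfs_alt n maps min_max
instance (n : Int) (maps : List (List Int)) (min_max : Int × Int) (out : Int) :
    Decidable (Spec_dfs n maps min_max out) := by unfold Spec_dfs; infer_instance

-- ===== CLAIM (what is proved, stated in full; the proofs are below) =====
def Claim_equal_dfs : Prop := ∀ (n : Int) (maps : List (List Int)) (min_max : Int × Int),
  Dom_dfs n maps min_max → Pre_dfs n maps min_max → Spec_dfs n maps min_max (dfs n maps min_max)

-- ===== LEMMAS AND PROOFS =====

lemma countP_set_one (r : List Int) (j : Nat) (h : r[j]? = some 0) :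
    (r.set j 1).countP (fun v => v == 0) + 1 = r.countP (fun v => v == 0) := by
  have hj : j < r.length := by
    by_contra hc
    rw [List.getElem?_eq_none (by omega)] at h
    simp at h
  have hv : r[j] = 0 := by
    rw [List.getElem?_eq_getElem hj] at h
    exact Option.some.inj h
  have hpos : 0 < r.countP (fun v => v == (0 : Int)) := by
    rw [List.countP_pos_iff]
    exact ⟨0, hv ▸ List.getElem_mem hj, by decide⟩
  rw [List.countP_set hj, hv]
  norm_num
  omega

lemma zeros_modify (g : List (List Int)) (k : Nat) (r : List Int) (f : List Int → List Int)
    (hg : g[k]? = some r)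
    (hf : (f r).countP (fun v => v == 0) + 1 = r.countP (fun v => v == 0)) :
    zeros (g.modify k f) + 1 = zeros g := by
  induction g generalizing k with
  | nil => simp at hg
  | cons a t ih =>
      cases k with
      | zero =>
          simp at hg
          rw [List.modify_zero_cons]
          simp only [zeros, List.map_cons, List.sum_cons]
          subst hg
          omega
      | succ k =>
          simp at hg
          rw [List.modify_succ_cons]
          have := ih k hg
          simp only [zeros, List.map_cons, List.sum_cons] at this ⊢
          omega

lemma visCell_eq_zero_elim (g : List (List Int)) (i j : Int)
    (h : visCell g i j = 0) (hi : 0 ≤ i) (hj : 0 ≤ j) :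
    ∃ r, g[i.toNat]? = some r ∧ r[j.toNat]? = some 0 := by
  unfold visCell at h
  rw [PySem.List.pyGet?_of_nonneg _ hi] at h
  cases hr : g[i.toNat]? with
  | none => rw [hr] at h; simp [PySem.List.pyGet?] at h
  | some r =>
      rw [hr] at h
      simp only [Option.getD_some] at h
      rw [PySem.List.pyGet?_of_nonneg _ hj] at h
      cases he : r[j.toNat]? with
      | none => rw [he] at h; simp at h
      | some v =>
          rw [he] at h
          simp only [Option.getD_some] at h
          exact ⟨r, rfl, h ▸ he⟩

lemma zeros_setVis (g : List (List Int)) (i j : Int)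
    (h : visCell g i j = 0) (hi : 0 ≤ i) (hj : 0 ≤ j) :
    zeros (setVis g i j) + 1 = zeros g := by
  obtain ⟨r, hr, he⟩ := visCell_eq_zero_elim g i j h hi hj
  exact zeros_modify g i.toNat r _ hr (countP_set_one r j.toNat he)

lemma zeros_pushStep_le (n : Int) (maps : List (List Int)) (height : Int)
    (s : List (Int × Int) × List (List Int)) (c : Int × Int) :
    zeros (pushStep n maps height s c).2 ≤ zeros s.2 := by
  unfold pushStep
  split_ifs with h
  · have := zeros_setVis s.2 c.1 c.2 h.2.2.2.2.2 h.1 h.2.2.1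
    show zeros (setVis s.2 c.1 c.2) ≤ zeros s.2
    omega
  · exact le_refl _

lemma zeros_foldl_pushStep_le {α : Type} (n : Int) (maps : List (List Int)) (height : Int)
    (f : α → Int × Int) (l : List α) (s : List (Int × Int) × List (List Int)) :
    zeros ((l.foldl (fun s m => pushStep n maps height s (f m)) s).2) ≤ zeros s.2 := by
  induction l generalizing s with
  | nil => exact le_refl _
  | cons m t ih =>
      simp only [List.foldl_cons]
      exact le_trans (ih _) (zeros_pushStep_le n maps height s (f m))

lemma zeros_fillA_le (n : Int) (maps : List (List Int)) (height : Int) :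
    ∀ (fuel : Nat) (st : List (Int × Int)) (vis : List (List Int)),
      zeros (fillA n maps height fuel st vis) ≤ zeros vis := by
  intro fuel
  induction fuel with
  | zero =>
      intro st vis
      cases st with
      | nil => rw [fillA]
      | cons hd t => rw [fillA]
  | succ f ih =>
      intro st vis
      cases st with
      | nil => rw [fillA]
      | cons hd t =>
          obtain ⟨x, y⟩ := hd
          rw [fillA]
          exact le_trans (ih _ _) (zeros_foldl_pushStep_le n maps height _ _ (t, vis))

-- the qualification test of `choose` / of B's seed scan, as a Bool predicate on a cell
def qualb (maps : List (List Int)) (height : Int) (vis : List (List Int)) (c : Int × Int) : Bool :=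
  decide (mapCell maps c.1 c.2 > height ∧ visCell vis c.1 c.2 = 0)

-- the row-major list of all grid cells
def allCells (n : Int) : List (Int × Int) :=
  (PySem.List.pyRange 0 n 1).flatMap (fun i => (PySem.List.pyRange 0 n 1).map (fun j => (i, j)))

-- B's per-cell seed action
def seedStep (n : Int) (maps : List (List Int)) (height : Int)
    (s : List (List Int) × Int) (c : Int × Int) : List (List Int) × Int :=
  if mapCell maps c.1 c.2 > height ∧ visCell s.1 c.1 c.2 = 0 then
    (fillB n maps height (5 * zeros (setVis s.1 c.1 c.2) + 1) [c] (setVis s.1 c.1 c.2), s.2 + 1)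
  else s

lemma chooseCols_eq_find (maps vis : List (List Int)) (height i : Int) (js : List Int) :
    chooseCols maps vis height i js = (js.map (fun j => (i, j))).find? (qualb maps height vis) := by
  induction js with
  | nil => simp [chooseCols]
  | cons j t ih =>
      rw [chooseCols, List.map_cons, List.find?_cons]
      by_cases h : mapCell maps i j > height ∧ visCell vis i j = 0
      · have hq : qualb maps height vis (i, j) = true := by simp [qualb]; exact h
        rw [hq, if_pos h]
      · have hq : qualb maps height vis (i, j) = false := by simp [qualb]; tauto
        rw [hq, if_neg h, ih]

lemma chooseRows_eq_find (n : Int) (maps vis : List (List Int)) (height : Int) (l : List Int) :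
    chooseRows n maps vis height l =
      (l.flatMap (fun i => (PySem.List.pyRange 0 n 1).map (fun j => (i, j)))).find?
        (qualb maps height vis) := by
  induction l with
  | nil => simp [chooseRows]
  | cons i t ih =>
      rw [chooseRows, List.flatMap_cons, List.find?_append, chooseCols_eq_find, ih]
      cases ((PySem.List.pyRange 0 n 1).map (fun j => (i, j))).find? (qualb maps height vis) with
      | none => simp
      | some c => simp

lemma chooseA_eq_find (n : Int) (maps vis : List (List Int)) (height : Int) :
    chooseA n maps vis height = (allCells n).find? (qualb maps height vis) :=
  chooseRows_eq_find n maps vis height _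

lemma mem_allCells (n : Int) (c : Int × Int) (h : c ∈ allCells n) :
    0 ≤ c.1 ∧ c.1 < n ∧ 0 ≤ c.2 ∧ c.2 < n := by
  unfold allCells at h
  simp only [List.mem_flatMap, List.mem_map] at h
  obtain ⟨i, hi, j, hj, hc⟩ := h
  rw [PySem.List.mem_pyRange_one] at hi hj
  subst hc
  exact ⟨hi.1, hi.2, hj.1, hj.2⟩

lemma fillA_eq_fillB (n : Int) (maps : List (List Int)) (height : Int) :
    ∀ (fuel : Nat) (st : List (Int × Int)) (vis : List (List Int)),
      fillA n maps height fuel st vis = fillB n maps height fuel st vis := by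
  intro fuel
  induction fuel with
  | zero =>
      intro st vis
      cases st with
      | nil => rw [fillA, fillB]
      | cons hd t => rw [fillA, fillB]
  | succ f ih =>
      intro st vis
      cases st with
      | nil => rw [fillA, fillB]
      | cons hd t =>
          obtain ⟨x, y⟩ := hd
          rw [fillA, fillB]
          have hl : ([(-1, 0), (1, 0), (0, 1), (0, -1)] : List (Int × Int)).foldl
              (fun s m => pushStep n maps height s (x + m.1, y + m.2)) (t, vis)
              = ([(x - 1, y), (x + 1, y), (x, y + 1), (x, y - 1)] : List (Int × Int)).foldl
                (pushStep n maps height) (t, vis) := by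
            rw [← List.foldl_map (f := fun m : Int × Int => (x + m.1, y + m.2))
              (g := pushStep n maps height)]
            congr 1
            simp
            constructor <;> ring
          rw [hl]
          exact ih _ _

-- visited entries never change back to 0
lemma visCell_setVis_ne (g : List (List Int)) (i j a b : Int)
    (ha : 0 ≤ a) (hb : 0 ≤ b) (h : visCell g a b ≠ 0) : visCell (setVis g i j) a b ≠ 0 := by
  unfold visCell setVis at *
  rw [PySem.List.pyGet?_of_nonneg _ ha] at h ⊢
  rw [PySem.List.pyGet?_of_nonneg _ hb] at h ⊢
  rw [List.getElem?_modify]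
  cases hr : g[a.toNat]? with
  | none => rw [hr] at h; exact h
  | some r =>
      rw [hr] at h
      show (if i.toNat = a.toNat then r.set j.toNat 1 else r)[b.toNat]?.getD 1 ≠ 0
      by_cases hik : i.toNat = a.toNat
      · rw [if_pos hik, List.getElem?_set]
        split_ifs with hjb hlen
        · simp
        · simp
        · exact h
      · rw [if_neg hik]
        exact h

lemma visCell_setVis_self (g : List (List Int)) (i j : Int)
    (h : visCell g i j = 0) (hi : 0 ≤ i) (hj : 0 ≤ j) :
    visCell (setVis g i j) i j ≠ 0 := by
  obtain ⟨r, hr, he⟩ := visCell_eq_zero_elim g i j h hi hj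
  have hjlen : j.toNat < r.length := by
    by_contra hc
    rw [List.getElem?_eq_none (by omega)] at he
    simp at he
  unfold visCell setVis
  rw [PySem.List.pyGet?_of_nonneg _ hi, PySem.List.pyGet?_of_nonneg _ hj,
    List.getElem?_modify, hr]
  show (if i.toNat = i.toNat then r.set j.toNat 1 else r)[j.toNat]?.getD 1 ≠ 0
  rw [if_pos rfl, List.getElem?_set]
  simp [hjlen]

lemma visCell_pushStep_ne (n : Int) (maps : List (List Int)) (height : Int)
    (s : List (Int × Int) × List (List Int)) (c : Int × Int) (a b : Int)
    (ha : 0 ≤ a) (hb : 0 ≤ b) (h : visCell s.2 a b ≠ 0) :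
    visCell (pushStep n maps height s c).2 a b ≠ 0 := by
  unfold pushStep
  split_ifs with hg
  · exact visCell_setVis_ne s.2 c.1 c.2 a b ha hb h
  · exact h

lemma visCell_foldl_pushStep_ne {α : Type} (n : Int) (maps : List (List Int)) (height : Int)
    (f : α → Int × Int) (l : List α) (s : List (Int × Int) × List (List Int)) (a b : Int)
    (ha : 0 ≤ a) (hb : 0 ≤ b) (h : visCell s.2 a b ≠ 0) :
    visCell ((l.foldl (fun s m => pushStep n maps height s (f m)) s).2) a b ≠ 0 := by
  induction l generalizing s with
  | nil => exact h
  | cons m t ih =>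
      simp only [List.foldl_cons]
      exact ih _ (visCell_pushStep_ne n maps height s (f m) a b ha hb h)

lemma visCell_fillB_ne (n : Int) (maps : List (List Int)) (height : Int) :
    ∀ (fuel : Nat) (st : List (Int × Int)) (vis : List (List Int)) (a b : Int),
      0 ≤ a → 0 ≤ b → visCell vis a b ≠ 0 → visCell (fillB n maps height fuel st vis) a b ≠ 0 := by
  intro fuel
  induction fuel with
  | zero =>
      intro st vis a b ha hb h
      cases st with
      | nil => rwa [fillB]
      | cons hd t => rwa [fillB]
  | succ f ih =>
      intro st vis a b ha hb h
      cases st with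
      | nil => rwa [fillB]
      | cons hd t =>
          obtain ⟨x, y⟩ := hd
          rw [fillB]
          exact ih _ _ a b ha hb
            (visCell_foldl_pushStep_ne n maps height (fun c : Int × Int => c) _ (t, vis) a b ha hb h)

lemma qualb_false_preserved (maps : List (List Int)) (height : Int)
    (vis vis' : List (List Int)) (c : Int × Int)
    (hmono : visCell vis c.1 c.2 ≠ 0 → visCell vis' c.1 c.2 ≠ 0)
    (h : qualb maps height vis c = false) : qualb maps height vis' c = false := by
  simp only [qualb, decide_eq_false_iff_not, not_and] at h ⊢
  intro hm hv
  exact hmono (h hm) hv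

lemma foldl_seedStep_skip (n : Int) (maps : List (List Int)) (height : Int)
    (L : List (Int × Int)) (vis : List (List Int)) (k : Int)
    (h : ∀ c ∈ L, qualb maps height vis c = false) :
    L.foldl (seedStep n maps height) (vis, k) = (vis, k) := by
  induction L with
  | nil => rfl
  | cons c t ih =>
      have hc := h c (by simp)
      simp only [qualb, decide_eq_false_iff_not] at hc
      simp only [List.foldl_cons, seedStep, if_neg hc]
      exact ih (fun c hm => h c (by simp [hm]))

lemma zeros_fillB_le (n : Int) (maps : List (List Int)) (height : Int)
    (fuel : Nat) (st : List (Int × Int)) (vis : List (List Int)) :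
    zeros (fillB n maps height fuel st vis) ≤ zeros vis := by
  rw [← fillA_eq_fillB]
  exact zeros_fillA_le n maps height fuel st vis

-- the heart of the equivalence: A's choose-restart loop equals B's row-major seed scan,
-- given that every cell already passed is disqualified
lemma outer_eq (n : Int) (maps : List (List Int)) (height : Int) :
    ∀ (fuel : Nat) (vis : List (List Int)), zeros vis < fuel →
      ∀ (done L : List (Int × Int)), allCells n = done ++ L →
        (∀ c ∈ done, qualb maps height vis c = false) →
        ∀ (cnt : Int),
          outerA n maps height fuel vis cnt = (L.foldl (seedStep n maps height) (vis, cnt)).2 := by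
  intro fuel
  induction fuel with
  | zero => intro vis hz; omega
  | succ f ih =>
    intro vis hz done L hsplit hdone cnt
    cases h : chooseA n maps vis height with
    | none =>
        rw [outerA]
        simp only [h]
        rw [chooseA_eq_find] at h
        rw [List.find?_eq_none] at h
        rw [foldl_seedStep_skip n maps height L vis cnt
          (fun c hc => by
            have : c ∈ allCells n := by rw [hsplit]; exact List.mem_append_right _ hc
            simpa using h c this)]
    | some c =>
        rw [outerA]
        simp only [h]
        rw [chooseA_eq_find] at h
        have hcmem : c ∈ allCells n := List.mem_of_find?_eq_some h
        obtain ⟨hc1, hc1n, hc2, hc2n⟩ := mem_allCells n c hcmem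
        rw [hsplit, List.find?_append] at h
        have hdnone : done.find? (qualb maps height vis) = none :=
          List.find?_eq_none.mpr (fun x hx => by simp [hdone x hx])
        rw [hdnone, Option.none_or] at h
        rw [List.find?_eq_some_iff_append] at h
        obtain ⟨hqc, L1, L2, hL, hL1⟩ := h
        have hqc' : mapCell maps c.1 c.2 > height ∧ visCell vis c.1 c.2 = 0 := by
          simpa [qualb] using hqc
        have hmemsub : ∀ x ∈ done ++ L1, x ∈ allCells n := by
          intro x hx
          rw [hsplit, hL]
          rcases List.mem_append.mp hx with h' | h'
          · exact List.mem_append_left _ h'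
          · exact List.mem_append_right _ (List.mem_append_left _ h')
        set vis' := fillB n maps height (5 * zeros (setVis vis c.1 c.2) + 1) [c]
          (setVis vis c.1 c.2) with hvis'
        have hmono : ∀ x : Int × Int, 0 ≤ x.1 → 0 ≤ x.2 →
            visCell vis x.1 x.2 ≠ 0 → visCell vis' x.1 x.2 ≠ 0 := by
          intro x hx1 hx2 hne
          exact visCell_fillB_ne n maps height _ _ _ x.1 x.2 hx1 hx2
            (visCell_setVis_ne vis c.1 c.2 x.1 x.2 hx1 hx2 hne)
        have hfalse' : ∀ x ∈ done ++ L1 ++ [c], qualb maps height vis' x = false := by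
          intro x hx
          rcases List.mem_append.mp hx with h' | h'
          · have hxall := hmemsub x (by simpa using h')
            obtain ⟨hx1, _, hx2, _⟩ := mem_allCells n x hxall
            have hxfalse : qualb maps height vis x = false := by
              rcases List.mem_append.mp h' with hd | hl1
              · exact hdone x hd
              · simpa using hL1 x hl1
            exact qualb_false_preserved maps height vis vis' x (hmono x hx1 hx2) hxfalse
          · have hxc : x = c := by simpa using h'
            subst hxc
            simp only [qualb, decide_eq_false_iff_not, not_and]
            intro _
            exact visCell_fillB_ne n maps height _ _ _ x.1 x.2 hc1 hc2
              (visCell_setVis_self vis x.1 x.2 hqc'.2 hc1 hc2)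
        have hzeros : zeros vis' < zeros vis := by
          have h1 := zeros_setVis vis c.1 c.2 hqc'.2 hc1 hc2
          have h2 := zeros_fillB_le n maps height (5 * zeros (setVis vis c.1 c.2) + 1) [c]
            (setVis vis c.1 c.2)
          rw [hvis']
          omega
        have hrec := ih vis' (by omega) (done ++ L1 ++ [c]) L2
          (by rw [hsplit, hL]; simp)
          hfalse' (cnt + 1)
        rw [fillA_eq_fillB, ← hvis', hrec, hL, List.foldl_append,
          foldl_seedStep_skip n maps height L1 vis cnt (fun x hx => by simpa using hL1 x hx),
          List.foldl_cons]
        simp only [seedStep, if_pos hqc']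
        rw [← hvis']

lemma grid_eq (n : Int) : mkVisA n = mkVisB n := by
  unfold mkVisA mkVisB
  apply List.map_congr_left
  intro a _
  rw [PySem.List.pyRepeat_singleton]
  rw [List.map_const']
  rw [PySem.List.length_pyRange_one]
  congr 1
  omega

lemma nested_eq (n : Int) (maps : List (List Int)) (height : Int) (s0 : List (List Int) × Int) :
    (PySem.List.pyRange 0 n 1).foldl
      (fun (s : List (List Int) × Int) i => (PySem.List.pyRange 0 n 1).foldl
        (fun s j => if mapCell maps i j > height ∧ visCell s.1 i j = 0 then
            (fillB n maps height (5 * zeros (setVis s.1 i j) + 1) [(i, j)] (setVis s.1 i j),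
              s.2 + 1) else s) s) s0
    = (allCells n).foldl (seedStep n maps height) s0 := by
  unfold allCells
  rw [List.foldl_flatMap]
  apply PySem.List.foldl_congr_mem
  intro acc i _
  rw [List.foldl_map]
  apply PySem.List.foldl_congr_mem
  intro acc2 j _
  rfl

lemma per_height (n : Int) (maps : List (List Int)) (height sm : Int) :
    (if outerA n maps height (zeros (mkVisA n) + 1) (mkVisA n) 0 > sm then
      outerA n maps height (zeros (mkVisA n) + 1) (mkVisA n) 0 else sm)
    = max sm (((PySem.List.pyRange 0 n 1).foldl
        (fun (s : List (List Int) × Int) i => (PySem.List.pyRange 0 n 1).foldl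
          (fun s j => if mapCell maps i j > height ∧ visCell s.1 i j = 0 then
              (fillB n maps height (5 * zeros (setVis s.1 i j) + 1) [(i, j)] (setVis s.1 i j),
                s.2 + 1) else s) s)
        (mkVisB n, 0)).2) := by
  have hmain : outerA n maps height (zeros (mkVisA n) + 1) (mkVisA n) 0 =
      (((PySem.List.pyRange 0 n 1).foldl
        (fun (s : List (List Int) × Int) i => (PySem.List.pyRange 0 n 1).foldl
          (fun s j => if mapCell maps i j > height ∧ visCell s.1 i j = 0 then
              (fillB n maps height (5 * zeros (setVis s.1 i j) + 1) [(i, j)] (setVis s.1 i j),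
                s.2 + 1) else s) s)
        (mkVisB n, 0)).2) := by
    rw [nested_eq, ← grid_eq]
    exact outer_eq n maps height (zeros (mkVisA n) + 1) (mkVisA n) (by omega)
      [] (allCells n) rfl (by simp) 0
  rw [hmain]
  omega

-- ===== VERDICT (by name: the statement is the Claim_ definition above) =====
theorem dfs_spec : Claim_equal_dfs := by
  intro n maps min_max _ _
  unfold Spec_dfs dfs dfs_alt
  apply PySem.List.foldl_congr_mem
  intro acc height _
  exact per_height n maps height acc
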